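-- pv_equiv track=rewrite | github.com/Willianan/Interview_Book | nowcoder/17_将满二叉树转换为求和树.py | func
-- ===== SOURCE A (Python) =====
-- def func(list):
-- 	if len(list) == 0:
-- 		return []
-- 	elif len(list) == 1:
-- 		return [0]
-- 	else:
-- 		mid = len(list) // 2
-- 		return func(list[:mid]) + [sum(list) - list[mid]] + func(list[mid + 1:])
-- ===== SOURCE B (Python) =====
-- def func(list):
--     # prefix sums + index-range recursion: O(n) total, no slicing, O(1) subarray sums
--     n = len(list)
--     pre = [0]
--     for x in list:
--         pre.append(pre[-1] + x)
--     out = []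
--     def go(lo, hi):
--         d = hi - lo
--         if d == 0:
--             return
--         if d == 1:
--             out.append(0)
--             return
--         mid = lo + d // 2
--         go(lo, mid)
--         out.append(pre[hi] - pre[lo] - list[mid])
--         go(mid + 1, hi)
--     go(0, n)
--     return out
-- ===== Notes on version B (the rewrite author's own statement) =====
-- stated objective: faster
-- what changed: Replaces A's slice-and-resum recursion (each level copies subarrays and recomputes sum()) by one precomputed prefix-sum array and a recursion on index ranges, so every subarray sum is O(1) and no list is copied.
import Mathlib
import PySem

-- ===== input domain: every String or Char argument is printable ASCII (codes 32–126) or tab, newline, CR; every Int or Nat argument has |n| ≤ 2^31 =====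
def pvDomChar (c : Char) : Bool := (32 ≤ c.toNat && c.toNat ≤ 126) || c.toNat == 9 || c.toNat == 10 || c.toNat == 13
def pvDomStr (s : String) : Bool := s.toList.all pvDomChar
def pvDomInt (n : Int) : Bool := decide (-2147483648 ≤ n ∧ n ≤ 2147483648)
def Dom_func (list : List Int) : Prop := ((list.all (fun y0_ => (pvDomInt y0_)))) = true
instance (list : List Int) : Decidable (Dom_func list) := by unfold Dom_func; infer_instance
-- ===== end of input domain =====

-- B replaces A's O(n log n) slice-and-sum recursion by a prefix-sum array and an
-- index-range recursion (O(1) subarray sums, no copying): same output, faster.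

-- ===== PORT A =====
def func (list : List Int) : List Int :=
  if _h0 : list.length = 0 then []
  else if _h1 : list.length = 1 then [0]
  else
    -- mid = len(list) // 2 : both operands nonnegative, exact (PySem.Int.floordiv_natCast)
    let mid := list.length / 2
    func (PySem.List.slice list none (some (mid : Int)))
      ++ [list.sum - list.getD mid 0]   -- list[mid]: 0 ≤ mid < len (PySem.List.pyGetD_natCast)
      ++ func (PySem.List.slice list (some ((mid : Int) + 1)) none)
termination_by list.length
decreasing_by
  · rw [PySem.List.slice_to_natCast]; simp; omega
  · have h : ((list.length / 2 : Nat) : Int) + 1 = ((list.length / 2 + 1 : Nat) : Int) := by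
      push_cast; ring
    rw [h, PySem.List.slice_from_natCast]; simp; omega

-- ===== PORT B =====
-- the inner 'go(lo, hi)' of Source B, returning the segment it appends to 'out'
def goB (pre l : List Int) (lo hi : Nat) : List Int :=
  let d := hi - lo
  if d = 0 then []
  else if d = 1 then [0]
  else
    let mid := lo + d / 2
    goB pre l lo mid
      ++ [pre.getD hi 0 - pre.getD lo 0 - l.getD mid 0]  -- pre[hi], pre[lo], list[mid]: all in range
      ++ goB pre l (mid + 1) hi
termination_by hi - lo
decreasing_by all_goals omega

def func_alt (list : List Int) : List Int :=
  -- pre = [0]; for x in list: pre.append(pre[-1] + x)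
  let pre := list.foldl (fun acc x => acc ++ [PySem.List.pyGetD acc (-1) 0 + x]) [0]
  goB pre list 0 list.length

-- ===== PRECONDITION & SPEC =====
def Spec_func (list : List Int) (out : List Int) : Prop := out = func_alt list
instance (list : List Int) (out : List Int) : Decidable (Spec_func list out) := by unfold Spec_func; infer_instance

-- ===== CLAIM (what is proved, stated in full; the proofs are below) =====
def Claim_equal_func : Prop := ∀ (list : List Int), Dom_func list → Spec_func list (func list)

-- ===== LEMMAS AND PROOFS =====

-- running partial sums starting from s (spec-side view of B's prefix list)
def tailSums (s : Int) : List Int → List Int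
  | [] => []
  | x :: xs => (s + x) :: tailSums (s + x) xs

lemma foldl_pre_eq (l : List Int) : ∀ (acc : List Int) (h : acc ≠ []),
    l.foldl (fun acc x => acc ++ [PySem.List.pyGetD acc (-1) 0 + x]) acc
      = acc ++ tailSums (acc.getLast h) l := by
  induction l with
  | nil => intro acc h; simp [tailSums]
  | cons x xs ih =>
    intro acc h
    simp only [List.foldl_cons]
    rw [show PySem.List.pyGetD acc (-1) (0:Int) = acc.getLast h from
          PySem.List.pyGetD_neg_one acc 0 h,
        ih (acc ++ [acc.getLast h + x]) (by simp)]
    simp [tailSums]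

lemma tailSums_getD (l : List Int) : ∀ (s : Int) (k : Nat), k ≤ l.length →
    (s :: tailSums s l).getD k 0 = s + (l.take k).sum := by
  induction l with
  | nil =>
    intro s k hk
    simp only [List.length_nil, Nat.le_zero] at hk
    subst hk
    simp [tailSums]
  | cons x xs ih =>
    intro s k hk
    cases k with
    | zero => simp
    | succ k =>
      simp only [tailSums, List.getD_cons_succ, List.take_succ_cons, List.sum_cons]
      rw [ih (s + x) k (by simpa using hk)]
      ring

lemma pre_getD (l : List Int) (k : Nat) (hk : k ≤ l.length) :
    (l.foldl (fun acc x => acc ++ [PySem.List.pyGetD acc (-1) 0 + x]) [0]).getD k 0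
      = (l.take k).sum := by
  rw [foldl_pre_eq l [0] (by simp)]
  have := tailSums_getD l 0 k hk
  simpa using this

lemma func_nil : func [] = [] := by simp [func]

lemma func_len_one (s : List Int) (h : s.length = 1) : func s = [0] := by
  rw [func]; simp [h]

lemma goB_eq_func (l : List Int) :
    ∀ (d lo hi : Nat), hi - lo = d → lo ≤ hi → hi ≤ l.length →
    goB (l.foldl (fun acc x => acc ++ [PySem.List.pyGetD acc (-1) 0 + x]) [0]) l lo hi
      = func ((l.drop lo).take (hi - lo)) := by
  intro d
  induction d using Nat.strong_induction_on with
  | _ d ih =>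
    intro lo hi hd hlh hhn
    rw [goB]
    by_cases h0 : hi - lo = 0
    · simp [h0, func_nil]
    · by_cases h1 : hi - lo = 1
      · rw [func_len_one]
        · simp [h1]
        · simp; omega
      · simp only [h0, h1, if_false]
        set s := (l.drop lo).take (hi - lo) with hs
        have hslen : s.length = hi - lo := by
          rw [hs, List.length_take, List.length_drop]; omega
        have hd2 : 0 < (hi - lo) / 2 := by omega
        have hd2lt : (hi - lo) / 2 < hi - lo := by omega
        have hL :
            goB (l.foldl (fun acc x => acc ++ [PySem.List.pyGetD acc (-1) 0 + x]) [0]) l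
              lo (lo + (hi - lo) / 2) = func (s.take ((hi - lo) / 2)) := by
          rw [ih ((hi - lo) / 2) (by omega) lo (lo + (hi - lo) / 2) (by omega) (by omega) (by omega),
              hs, List.take_take]
          congr 2
          omega
        have hR :
            goB (l.foldl (fun acc x => acc ++ [PySem.List.pyGetD acc (-1) 0 + x]) [0]) l
              (lo + (hi - lo) / 2 + 1) hi = func (s.drop ((hi - lo) / 2 + 1)) := by
          rw [ih (hi - lo - ((hi - lo) / 2 + 1)) (by omega)
                (lo + (hi - lo) / 2 + 1) hi (by omega) (by omega) (by omega),
              hs, List.drop_take, List.drop_drop]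
          congr 2
          all_goals omega
        have hsum : s.sum = (l.take hi).sum - (l.take lo).sum := by
          have htk : l.take hi = l.take lo ++ (l.drop lo).take (hi - lo) := by
            rw [← List.take_add]
            congr 1
            omega
          rw [hs, htk, List.sum_append]
          ring
        have hget : s.getD ((hi - lo) / 2) 0 = l.getD (lo + (hi - lo) / 2) 0 := by
          simp only [List.getD_eq_getElem?_getD, hs]
          rw [List.getElem?_take_of_lt hd2lt, List.getElem?_drop]
        rw [func]
        simp only [hslen, h0, h1, dite_false]
        rw [PySem.List.slice_to_natCast]
        have hcast : (((hi - lo) / 2 : Nat) : Int) + 1 = (((hi - lo) / 2 + 1 : Nat) : Int) := by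
          push_cast; ring
        rw [hcast, PySem.List.slice_from_natCast, hL, hR,
            pre_getD l hi hhn, pre_getD l lo (by omega), hsum, hget]

-- ===== VERDICT (by name: the statement is the Claim_ definition above) =====
theorem func_spec : Claim_equal_func := by
  intro l _
  unfold Spec_func func_alt
  rw [goB_eq_func l l.length 0 l.length (by omega) (by omega) (by omega)]
  simp
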